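-- pv_equiv track=rewrite | github.com/sodlfmag/Dev-Course-Algorithm | 프로그래머스/2/121685. [PCCP 모의고사 1] 3번 - 유전법칙/[PCCP 모의고사 1] 3번 - 유전법칙.py | ascend
-- ===== SOURCE A (Python) =====
-- def ascend(generation, index):
--     if generation == 1: return "Rr"
--     child = ["RR", "Rr", "Rr", "rr"]
--     parent = ascend(generation - 1, index // 4)
--     if parent == "Rr":
--         return child[index % 4]
--     else:
--         return parent
-- ===== SOURCE B (Python) =====
-- def ascend(generation, index):
--     # Iterative: scan the base-4 digits of index from least to most significant,
--     # overwriting the result so the most significant 0/3 digit among the first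
--     # generation-1 digits wins; stops early once the remaining digits are constant.
--     result = "Rr"
--     n = generation - 1
--     while n > 0:
--         if index == 0:
--             return "RR"
--         if index == -1:
--             return "rr"
--         d = index % 4
--         if d == 0:
--             result = "RR"
--         elif d == 3:
--             result = "rr"
--         index //= 4
--         n -= 1
--     return result
-- ===== Notes on version B (the rewrite author's own statement) =====
-- stated objective: faster
-- what changed: Replaced the pedigree recursion with an iterative scan over the base-4 digits of index that overwrites the result (most significant 0/3 digit wins) and stops early once the remaining digits are all 0 or all 3, so the cost is O(min(generation, log|index|)) instead of O(generation) recursion depth.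
-- outside the precondition, e.g. on ascend(8500, 5): A returns 'RR', B returns 'RR'; on ascend(9999, 5): A raises RecursionError, B returns 'RR'; on ascend(0, 7): A raises RecursionError, B returns 'Rr'
import Mathlib
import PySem

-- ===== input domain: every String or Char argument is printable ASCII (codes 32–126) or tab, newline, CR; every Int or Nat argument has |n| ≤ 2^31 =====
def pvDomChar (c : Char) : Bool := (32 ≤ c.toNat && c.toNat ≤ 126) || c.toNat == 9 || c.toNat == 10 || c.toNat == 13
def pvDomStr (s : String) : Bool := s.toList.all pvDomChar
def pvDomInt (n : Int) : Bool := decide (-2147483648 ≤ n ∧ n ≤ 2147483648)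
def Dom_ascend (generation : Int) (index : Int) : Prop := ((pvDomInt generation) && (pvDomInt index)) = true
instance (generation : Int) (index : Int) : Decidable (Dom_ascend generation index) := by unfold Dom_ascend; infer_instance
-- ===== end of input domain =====

-- B replaces A's pedigree recursion by an iterative base-4 digit scan with early exit, avoiding deep recursion.


-- ===== PORT A =====
def ascend (generation : Int) (index : Int) : String :=
  if generation == 1 then "Rr"
  else if h : 1 < generation then
    let child : List String := ["RR", "Rr", "Rr", "rr"]
    let parent := ascend (generation - 1) (PySem.Int.floordiv index 4)
    if parent == "Rr" then PySem.List.pyGetD child (PySem.Int.mod index 4) "" else parent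
  else "Rr"  -- totality guard only: for generation < 1 Python recurses forever (RecursionError); excluded by Pre_
termination_by generation.toNat
decreasing_by omega

-- ===== PORT B =====
def ascendAltLoop (n : Int) (index : Int) (result : String) : String :=
  if _h : 0 < n then
    if index == 0 then "RR"
    else if index == -1 then "rr"
    else
      let d := PySem.Int.mod index 4
      ascendAltLoop (n - 1) (PySem.Int.floordiv index 4)
        (if d == 0 then "RR" else if d == 3 then "rr" else result)
  else result
termination_by n.toNat
decreasing_by omega

def ascend_alt (generation : Int) (index : Int) : String :=
  ascendAltLoop (generation - 1) index "Rr"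

-- ===== PRECONDITION & SPEC =====
-- Pre_ excludes generation < 1 (A's recursion never reaches its base case and raises RecursionError) and,
-- conservatively, generation > 8000: A's recursion is generation frames deep, so large generation exceeds
-- CPython's recursion limit and raises RecursionError (the exact threshold depends on the interpreter).
def Pre_ascend (generation : Int) (index : Int) : Prop := 1 ≤ generation ∧ generation ≤ 8000
instance (generation : Int) (index : Int) : Decidable (Pre_ascend generation index) := by unfold Pre_ascend; infer_instance
def pvWitness_ascend : Int × Int := (3, 5)

def Spec_ascend (generation : Int) (index : Int) (out : String) : Prop := out = ascend_alt generation index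
instance (generation : Int) (index : Int) (out : String) : Decidable (Spec_ascend generation index out) := by unfold Spec_ascend; infer_instance

-- ===== CLAIM (what is proved, stated in full; the proofs are below) =====
def Claim_equal_ascend : Prop := ∀ (generation : Int) (index : Int), Dom_ascend generation index → Pre_ascend generation index → Spec_ascend generation index (ascend generation index)

-- ===== LEMMAS AND PROOFS =====

theorem ascend_one (index : Int) : ascend 1 index = "Rr" := by
  rw [ascend]; simp

theorem ascend_step (generation index : Int) (h : 1 < generation) :
    ascend generation index =
      (if ascend (generation - 1) (PySem.Int.floordiv index 4) == "Rr"
        then PySem.List.pyGetD ["RR", "Rr", "Rr", "rr"] (PySem.Int.mod index 4) ""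
        else ascend (generation - 1) (PySem.Int.floordiv index 4)) := by
  rw [ascend]
  have h1 : ¬ (generation == 1) = true := by simp; omega
  simp [h1, h]

theorem ascend_zero (n : Nat) : ascend ((n : Int) + 2) 0 = "RR" := by
  induction n with
  | zero =>
    rw [ascend_step _ _ (by omega)]
    norm_num [ascend_one]
  | succ k ih =>
    rw [ascend_step _ _ (by omega)]
    have e : ((k : Int) + 1 + 2 - 1) = (k : Int) + 2 := by ring
    have f : PySem.Int.floordiv 0 4 = 0 := by decide
    push_cast
    rw [e, f, ih]
    simp

theorem ascend_neg_one (n : Nat) : ascend ((n : Int) + 2) (-1) = "rr" := by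
  induction n with
  | zero =>
    rw [ascend_step _ _ (by omega)]
    norm_num [ascend_one]
    decide
  | succ k ih =>
    rw [ascend_step _ _ (by omega)]
    have e : ((k : Int) + 1 + 2 - 1) = (k : Int) + 2 := by ring
    have f : PySem.Int.floordiv (-1) 4 = -1 := by decide
    push_cast
    rw [e, f, ih]
    simp

theorem loop_spec (n : Nat) : ∀ (i : Int) (res : String),
    ascendAltLoop (n : Int) i res =
      (if ascend ((n : Int) + 1) i == "Rr" then res else ascend ((n : Int) + 1) i) := by
  induction n with
  | zero =>
    intro i res
    rw [ascendAltLoop]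
    simp [ascend_one]
  | succ k ih =>
    intro i res
    rw [ascendAltLoop]
    have hk : ((k + 1 : Nat) : Int) = (k : Int) + 1 := by push_cast; ring
    rw [hk]
    have hpos : (0 : Int) < (k : Int) + 1 := by positivity
    rw [dif_pos hpos]
    have hcast : ((k : Int) + 1) + 1 = (k : Int) + 2 := by ring
    by_cases h0 : i = 0
    · subst h0
      rw [if_pos (by decide)]
      rw [hcast, ascend_zero]
      simp
    · by_cases h1 : i = -1
      · subst h1
        rw [if_neg (by decide), if_pos (by decide)]
        rw [hcast, ascend_neg_one]
        simp
      · have e1 : ((k : Int) + 1) - 1 = (k : Int) := by ring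
        rw [if_neg (by simpa using h0), if_neg (by simpa using h1), e1, hcast]
        rw [ascend_step ((k : Int) + 2) i (by omega)]
        have e2 : (k : Int) + 2 - 1 = (k : Int) + 1 := by ring
        rw [e2, ih]
        have hf : PySem.Int.floordiv i 4 = i / 4 := PySem.Int.floordiv_eq_ediv_of_pos (by norm_num)
        by_cases hp : ascend ((k : Int) + 1) (i / 4) = "Rr"
        · have hd0 : 0 ≤ PySem.Int.mod i 4 := PySem.Int.mod_nonneg _ (by norm_num)
          have hd4 : PySem.Int.mod i 4 < 4 := PySem.Int.mod_lt _ (by norm_num)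
          have : PySem.Int.mod i 4 = 0 ∨ PySem.Int.mod i 4 = 1 ∨ PySem.Int.mod i 4 = 2 ∨ PySem.Int.mod i 4 = 3 := by omega
          have c0 : PySem.List.pyGetD ["RR", "Rr", "Rr", "rr"] (0 : Int) "" = "RR" := by decide
          have c1 : PySem.List.pyGetD ["RR", "Rr", "Rr", "rr"] (1 : Int) "" = "Rr" := by decide
          have c2 : PySem.List.pyGetD ["RR", "Rr", "Rr", "rr"] (2 : Int) "" = "Rr" := by decide
          have c3 : PySem.List.pyGetD ["RR", "Rr", "Rr", "rr"] (3 : Int) "" = "rr" := by decide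
          rcases this with h | h | h | h <;> rw [h] <;> simp [hf, hp, c0, c1, c2, c3]
        · simp [hp]

-- ===== VERDICT (by name: the statement is the Claim_ definition above) =====
theorem ascend_spec : Claim_equal_ascend := by
  unfold Claim_equal_ascend Spec_ascend Pre_ascend ascend_alt
  intro g i _ hpre
  have hn : ((g - 1).toNat : Int) = g - 1 := by omega
  have := loop_spec (g - 1).toNat i "Rr"
  rw [hn] at this
  rw [show g - 1 + 1 = g from by ring] at this
  rw [this]
  by_cases h : ascend g i = "Rr" <;> simp [h]
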